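-- pv_equiv track=rewrite | github.com/981377660LMT/algorithm-study | 6_tree/前缀树trie/字典序搜索/386. 字典序排数.py | lexicalOrder2
-- ===== SOURCE A (Python) =====
-- from typing import Generator, List
--
-- def lexicalOrder2(n: int) -> List[int]:
--     """
--     给你一个整数 n ，按字典序返回范围 [1, n] 内所有整数。
--     你必须设计一个时间复杂度为 O(n) 且使用 O(1) 额外空间的算法。
--     """
--
--     def dfs(cur: int) -> Generator[int, None, None]:
--         for i in range(10):
--             next = cur * 10 + i
--             if next > n:
--                 return
--             if next == 0:
--                 continue
--             yield next
--             yield from dfs(next)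
--
--     return list(dfs(0))  # 0表示虚拟根节点
-- ===== SOURCE B (Python) =====
-- from typing import List
--
--
-- def lexicalOrder2(n: int) -> List[int]:
--     """Iterative lexicographic successor: O(1) extra space, no recursion."""
--     res = []
--     cur = 1
--     for _ in range(n):
--         res.append(cur)
--         if cur * 10 <= n:
--             cur *= 10
--         else:
--             while cur % 10 == 9 or cur + 1 > n:
--                 cur //= 10
--             cur += 1
--     return res
-- ===== Notes on version B (the rewrite author's own statement) =====
-- stated objective: idiomatic
-- what changed: Replaced the recursive DFS generator over the implicit digit trie by the standard iterative lexicographic-successor loop (cur*10 when possible, otherwise strip trailing digits while cur%10==9 or cur+1>n, then increment), using O(1) extra space and no recursion.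
import Mathlib
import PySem

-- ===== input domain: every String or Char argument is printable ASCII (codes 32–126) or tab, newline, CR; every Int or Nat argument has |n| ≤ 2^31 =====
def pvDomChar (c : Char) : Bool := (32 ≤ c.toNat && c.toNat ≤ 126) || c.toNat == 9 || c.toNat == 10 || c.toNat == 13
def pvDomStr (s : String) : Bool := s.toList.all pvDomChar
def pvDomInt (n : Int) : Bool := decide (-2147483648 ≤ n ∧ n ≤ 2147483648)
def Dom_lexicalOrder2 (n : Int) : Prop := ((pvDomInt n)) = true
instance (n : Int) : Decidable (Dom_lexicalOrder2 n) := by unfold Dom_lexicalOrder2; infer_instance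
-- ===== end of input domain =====

-- B replaces A's recursive DFS generator over the digit trie by the standard iterative
-- lexicographic-successor loop (O(1) extra space, no recursion); return values are proved equal.

-- ===== PORT A =====
-- A's `dfs(cur)` with its `for i in range(10)` loop made explicit: `dfsA n cur i hc` is the
-- remainder of dfs(cur)'s loop from index i.  The hypothesis `hc : 0 ≤ cur` (an invariant of
-- every call A's code ever makes) only justifies termination; it does not alter the computation.
def dfsA (n : Int) (cur : Int) (i : Nat) (hc : 0 ≤ cur) : List Int :=
  if hi : i < 10 then
    if hgt : cur * 10 + (i : Int) > n then []            -- `if next > n: return`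
    else if h0 : cur * 10 + (i : Int) = 0 then           -- `if next == 0: continue`
      dfsA n cur (i + 1) hc
    else                                                 -- `yield next; yield from dfs(next)`
      ((cur * 10 + (i : Int)) :: dfsA n (cur * 10 + (i : Int)) 0 (by omega)) ++ dfsA n cur (i + 1) hc
  else []
termination_by ((n - cur).toNat, 10 - i)
decreasing_by
  · exact Prod.Lex.right _ (by omega)
  · exact Prod.Lex.left _ _ (by omega)
  · exact Prod.Lex.right _ (by omega)

def lexicalOrder2 (n : Int) : List Int := dfsA n 0 0 (le_refl 0)

-- ===== PORT B =====
-- the `while cur % 10 == 9 or cur + 1 > n: cur //= 10` loop of Source B; the fuel argument only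
-- makes it total (cur.toNat + 1 steps always suffice on the states B's loop ever reaches)
def rollB (n : Int) : Nat → Int → Int
  | 0, cur => cur
  | f + 1, cur =>
    if PySem.Int.mod cur 10 = 9 ∨ cur + 1 > n then rollB n f (PySem.Int.floordiv cur 10) else cur

-- one iteration of Source B's for-body acting on `cur` (after the append)
def stepB (n cur : Int) : Int :=
  if cur * 10 ≤ n then cur * 10 else rollB n (cur.toNat + 1) cur + 1

-- `for _ in range(n)`: k remaining iterations, appending cur then updating it
def goB (n : Int) : Nat → Int → List Int
  | 0, _ => []
  | k + 1, cur => cur :: goB n k (stepB n cur)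

def lexicalOrder2_alt (n : Int) : List Int := goB n n.toNat 1

-- ===== PRECONDITION & SPEC =====
def Spec_lexicalOrder2 (n : Int) (out : List Int) : Prop := out = lexicalOrder2_alt n
instance (n : Int) (out : List Int) : Decidable (Spec_lexicalOrder2 n out) := by unfold Spec_lexicalOrder2; infer_instance

-- ===== CLAIM (what is proved, stated in full; the proofs are below) =====
def Claim_equal_lexicalOrder2 : Prop := ∀ (n : Int), Dom_lexicalOrder2 n → Spec_lexicalOrder2 n (lexicalOrder2 n)

-- ===== LEMMAS AND PROOFS =====

-- `cur :: dfs(cur)`: the full depth-first listing of cur's subtree, head included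
def subL (n c : Int) (hc : 0 ≤ c) : List Int := c :: dfsA n c 0 hc

-- iterates of stepB (the value of `cur` after k iterations of B's loop body)
def iterB (n : Int) : Nat → Int → Int
  | 0, x => x
  | k + 1, x => iterB n k (stepB n x)

-- the value B's while-loop leaves in `cur`, with always-sufficient fuel
def rollV (n cur : Int) : Int := rollB n (cur.toNat + 1) cur

-- x with its last k decimal digits stripped
def strip : Nat → Int → Int
  | 0, x => x
  | k + 1, x => strip k x / 10

-- c is a decimal prefix of x
def Pref (c x : Int) : Prop := ∃ k, strip k x = c

theorem pv_goB_length (n : Int) : ∀ (k : Nat) (x : Int), (goB n k x).length = k := by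
  intro k
  induction k with
  | zero => intro x; rfl
  | succ k ih => intro x; simp [goB, ih]

theorem pv_iterB_add (n : Int) : ∀ (a b : Nat) (x : Int), iterB n (a + b) x = iterB n b (iterB n a x) := by
  intro a
  induction a with
  | zero => intro b x; rw [Nat.zero_add]; rfl
  | succ a ih =>
    intro b x
    rw [show a + 1 + b = (a + b) + 1 from by omega]
    show iterB n (a + b) (stepB n x) = _
    rw [ih]
    rfl

theorem pv_goB_add (n : Int) : ∀ (a b : Nat) (x : Int), goB n (a + b) x = goB n a x ++ goB n b (iterB n a x) := by
  intro a
  induction a with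
  | zero => intro b x; rw [Nat.zero_add]; rfl
  | succ a ih =>
    intro b x
    rw [show a + 1 + b = (a + b) + 1 from by omega]
    show x :: goB n (a + b) (stepB n x) = _
    rw [ih]
    rfl

theorem pv_mod10_eq (cur : Int) : PySem.Int.mod cur 10 = cur % 10 :=
  PySem.Int.mod_eq_emod_of_pos (by norm_num)

theorem pv_fdiv10_eq (cur : Int) : PySem.Int.floordiv cur 10 = cur / 10 :=
  PySem.Int.floordiv_eq_ediv_of_pos (by norm_num)

theorem pv_roll_fuel (n : Int) (hn : 1 ≤ n) :
    ∀ (m : Nat) (cur : Int), 0 ≤ cur → cur.toNat = m → ∀ f, m < f → rollB n f cur = rollV n cur := by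
  intro m
  induction m using Nat.strong_induction_on with
  | _ m ih =>
    intro cur hc hm f hf
    obtain ⟨f', rfl⟩ : ∃ f', f = f' + 1 := ⟨f - 1, by omega⟩
    by_cases hcond : PySem.Int.mod cur 10 = 9 ∨ cur + 1 > n
    · have hcur1 : 1 ≤ cur := by
        rcases hcond with h | h
        · rw [pv_mod10_eq] at h; omega
        · omega
      have h1 : rollB n (f' + 1) cur = rollB n f' (cur / 10) := by
        rw [rollB, if_pos hcond, pv_fdiv10_eq]
      have h2 : rollV n cur = rollB n cur.toNat (cur / 10) := by
        rw [rollV, rollB, if_pos hcond, pv_fdiv10_eq]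
      have hlt : (cur / 10).toNat < m := by omega
      rw [h1, h2, ih _ hlt (cur / 10) (by omega) rfl f' (by omega),
          ih _ hlt (cur / 10) (by omega) rfl cur.toNat (by omega)]
    · rw [rollB, if_neg hcond, rollV, rollB, if_neg hcond]

theorem pv_roll_id (n cur : Int) (hcond : ¬ (PySem.Int.mod cur 10 = 9 ∨ cur + 1 > n)) :
    rollV n cur = cur := by
  rw [rollV, rollB, if_neg hcond]

theorem pv_roll_step (n cur : Int) (hn : 1 ≤ n) (hc : 0 ≤ cur)
    (hcond : PySem.Int.mod cur 10 = 9 ∨ cur + 1 > n) :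
    rollV n cur = rollV n (cur / 10) := by
  have hcur1 : 1 ≤ cur := by
    rcases hcond with h | h
    · rw [pv_mod10_eq] at h; omega
    · omega
  rw [rollV, rollB, if_pos hcond, pv_fdiv10_eq]
  exact pv_roll_fuel n hn (cur / 10).toNat (cur / 10) (by omega) rfl cur.toNat (by omega)

-- ---------- strip / Pref facts ----------

theorem pv_strip_bounds : ∀ (k : Nat) (x : Int), 0 ≤ x → 0 ≤ strip k x ∧ strip k x ≤ x := by
  intro k
  induction k with
  | zero => intro x hx; exact ⟨hx, le_refl x⟩
  | succ k ih =>
    intro x hx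
    have h := ih x hx
    show 0 ≤ strip k x / 10 ∧ strip k x / 10 ≤ x
    omega

theorem pv_strip_nonpos : ∀ (k : Nat) (x : Int), x ≤ 0 → strip k x ≤ 0 := by
  intro k
  induction k with
  | zero => intro x hx; exact hx
  | succ k ih =>
    intro x hx
    have h := ih x hx
    show strip k x / 10 ≤ 0
    omega

theorem pv_strip_add : ∀ (m k : Nat) (x : Int), strip (m + k) x = strip m (strip k x) := by
  intro m
  induction m with
  | zero => intro k x; simp [strip]
  | succ m ih =>
    intro k x
    rw [show m + 1 + k = (m + k) + 1 from by omega]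
    show strip (m + k) x / 10 = _
    rw [ih]
    rfl

theorem pv_pref_le (c x : Int) (hc : 1 ≤ c) (h : Pref c x) : c ≤ x := by
  obtain ⟨k, hk⟩ := h
  by_cases hx : 0 ≤ x
  · have := pv_strip_bounds k x hx
    omega
  · have := pv_strip_nonpos k x (by omega)
    omega

theorem pv_pref_refl (c : Int) : Pref c c := ⟨0, rfl⟩

theorem pv_pref_up (c x : Int) (j : Nat) (hj : j ≤ 9) (h : Pref (c * 10 + (j : Int)) x) : Pref c x := by
  obtain ⟨k, hk⟩ := h
  refine ⟨k + 1, ?_⟩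
  show strip k x / 10 = c
  rw [hk]
  omega

theorem pv_pref_down (c x : Int) (hc : 1 ≤ c) (hne : c ≠ x) (h : Pref c x) :
    ∃ j : Nat, j ≤ 9 ∧ c * 10 + (j : Int) ≤ x ∧ Pref (c * 10 + (j : Int)) x := by
  obtain ⟨k, hk⟩ := h
  have hx1 : 1 ≤ x := le_trans hc (pv_pref_le c x hc ⟨k, hk⟩)
  cases k with
  | zero => exact absurd hk.symm hne
  | succ k =>
    have hp := pv_strip_bounds k x (by omega)
    have hdiv : strip k x / 10 = c := hk
    refine ⟨(strip k x - c * 10).toNat, by omega, by omega, ⟨k, by omega⟩⟩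

theorem pv_lead_digit : ∀ (m : Nat) (x : Int), 0 ≤ x → x.toNat = m → 1 ≤ x →
    ∃ k, 1 ≤ strip k x ∧ strip k x ≤ 9 := by
  intro m
  induction m using Nat.strong_induction_on with
  | _ m ih =>
    intro x hx hm h1
    by_cases hsmall : x ≤ 9
    · exact ⟨0, h1, hsmall⟩
    · have hd : 0 ≤ x / 10 := by omega
      obtain ⟨k, hk⟩ := ih (x / 10).toNat (by omega) (x / 10) hd rfl (by omega)
      have : strip k (x / 10) = strip (k + 1) x := by
        rw [show k + 1 = k + (0 + 1) from by omega, pv_strip_add]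
        rfl
      exact ⟨k + 1, by rw [← this]; exact hk⟩

theorem pv_pref_disj (c x : Int) (hc0 : 0 ≤ c) (i j : Nat) (hi : i ≤ 9) (hj : j ≤ 9) (hij : i ≠ j)
    (h1 : 1 ≤ c * 10 + (i : Int)) (h2 : 1 ≤ c * 10 + (j : Int))
    (hpi : Pref (c * 10 + (i : Int)) x) (hpj : Pref (c * 10 + (j : Int)) x) : False := by
  obtain ⟨k1, hk1⟩ := hpi
  obtain ⟨k2, hk2⟩ := hpj
  have key : ∀ (a b : Int) (ka kb : Nat), 0 ≤ a → ka ≤ kb → strip ka x = a → strip kb x = b →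
      a = b ∨ b ≤ a / 10 := by
    intro a b ka kb ha0 hle ha hb
    rcases Nat.eq_or_lt_of_le hle with rfl | hlt
    · left; rw [← ha, ← hb]
    · right
      obtain ⟨d, rfl⟩ : ∃ d, kb = (d + 1) + ka := ⟨kb - ka - 1, by omega⟩
      rw [pv_strip_add, ha, pv_strip_add] at hb
      have h1 : strip 1 a = a / 10 := rfl
      rw [h1] at hb
      have := pv_strip_bounds d (a / 10) (by omega)
      omega
  rcases le_total k1 k2 with hle | hle
  · rcases key _ _ _ _ (by omega) hle hk1 hk2 with h | h <;> omega
  · rcases key _ _ _ _ (by omega) hle hk2 hk1 with h | h <;> omega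

-- ---------- chain: the DFS output is an orbit of stepB ----------

theorem pv_chain_loop (n cur : Int) (hc : 0 ≤ cur) (hcn : cur ≤ n)
    (IH : ∀ (c' : Int) (hc' : 0 ≤ c'), cur < c' → 1 ≤ c' → c' ≤ n →
      ∃ k, subL n c' hc' = goB n (k + 1) c' ∧ iterB n (k + 1) c' = rollV n c' + 1) :
    ∀ (d i : Nat), i + d = 10 → 1 ≤ cur * 10 + (i : Int) →
      ((i < 10 ∧ cur * 10 + (i : Int) ≤ n) →
        ∃ k, dfsA n cur i hc = goB n (k + 1) (cur * 10 + (i : Int)) ∧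
             iterB n (k + 1) (cur * 10 + (i : Int)) = rollV n cur + 1) ∧
      (¬ (i < 10 ∧ cur * 10 + (i : Int) ≤ n) → dfsA n cur i hc = []) := by
  intro d
  induction d with
  | zero =>
    intro i hd hi1
    refine ⟨fun h => absurd h.1 (by omega), fun _ => ?_⟩
    rw [dfsA, dif_neg (by omega : ¬ i < 10)]
  | succ d ihd =>
    intro i hd hi1
    have hi10 : i < 10 := by omega
    by_cases hle : cur * 10 + (i : Int) ≤ n
    · refine ⟨fun _ => ?_, fun hcon => absurd ⟨hi10, hle⟩ hcon⟩
      have hbody : dfsA n cur i hc =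
          ((cur * 10 + (i : Int)) :: dfsA n (cur * 10 + (i : Int)) 0 (by omega)) ++
            dfsA n cur (i + 1) hc := by
        rw [dfsA, dif_pos hi10, dif_neg (by omega : ¬ cur * 10 + (i : Int) > n),
            dif_neg (by omega : ¬ cur * 10 + (i : Int) = 0)]
      obtain ⟨k', e1, e2⟩ := IH (cur * 10 + (i : Int)) (by omega) (by omega) (by omega) hle
      rw [subL] at e1
      have hrest := ihd (i + 1) (by omega) (by push_cast; omega)
      by_cases hnext : ((i + 1) < 10 ∧ cur * 10 + ((i + 1 : Nat) : Int) ≤ n)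
      · obtain ⟨k2, g1, g2⟩ := hrest.1 hnext
        have hcast : cur * 10 + ((i + 1 : Nat) : Int) = (cur * 10 + (i : Int)) + 1 := by
          push_cast; ring
        rw [hcast] at g1 g2
        have hroll : rollV n (cur * 10 + (i : Int)) = cur * 10 + (i : Int) := by
          refine pv_roll_id n _ ?_
          rw [pv_mod10_eq]
          push_cast at hnext
          omega
        rw [hroll] at e2
        refine ⟨k' + k2 + 1, ?_, ?_⟩
        · rw [hbody, e1, g1,
              show k' + k2 + 1 + 1 = (k' + 1) + (k2 + 1) from by omega,
              pv_goB_add n (k' + 1) (k2 + 1), e2]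
        · rw [show k' + k2 + 1 + 1 = (k' + 1) + (k2 + 1) from by omega,
              pv_iterB_add n (k' + 1) (k2 + 1), e2, g2]
      · have hnil : dfsA n cur (i + 1) hc = [] := hrest.2 hnext
        have hcondt : PySem.Int.mod (cur * 10 + (i : Int)) 10 = 9 ∨ (cur * 10 + (i : Int)) + 1 > n := by
          rw [pv_mod10_eq]
          push_cast at hnext
          omega
        have hroll : rollV n (cur * 10 + (i : Int)) = rollV n cur := by
          rw [pv_roll_step n _ (by omega) (by omega) hcondt]
          congr 1
          omega
        refine ⟨k', ?_, ?_⟩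
        · rw [hbody, e1, hnil, List.append_nil]
        · rw [e2, hroll]
    · refine ⟨fun h => absurd h.2 hle, fun _ => ?_⟩
      rw [dfsA, dif_pos hi10, dif_pos (by omega : cur * 10 + (i : Int) > n)]

theorem pv_sub_chain (n : Int) : ∀ (m : Nat) (c : Int) (hc0 : 0 ≤ c), (n - c).toNat = m →
    1 ≤ c → c ≤ n →
    ∃ k, subL n c hc0 = goB n (k + 1) c ∧ iterB n (k + 1) c = rollV n c + 1 := by
  intro m
  induction m using Nat.strong_induction_on with
  | _ m ih =>
    intro c hc0 hm h1 h2
    have IH' : ∀ (c' : Int) (hc' : 0 ≤ c'), c < c' → 1 ≤ c' → c' ≤ n →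
        ∃ k, subL n c' hc' = goB n (k + 1) c' ∧ iterB n (k + 1) c' = rollV n c' + 1 :=
      fun c' hc' hlt h1' h2' => ih (n - c').toNat (by omega) c' hc' rfl h1' h2'
    obtain ⟨C1, C2⟩ := pv_chain_loop n c hc0 h2 IH' 10 0 rfl (by omega)
    by_cases hb : c * 10 ≤ n
    · obtain ⟨k, e1, e2⟩ := C1 ⟨by omega, by omega⟩
      have hzero : c * 10 + ((0 : Nat) : Int) = c * 10 := by push_cast; ring
      rw [hzero] at e1 e2
      have hstep : stepB n c = c * 10 := by rw [stepB, if_pos hb]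
      refine ⟨k + 1, ?_, ?_⟩
      · show c :: dfsA n c 0 hc0 = goB n (k + 1 + 1) c
        show c :: dfsA n c 0 hc0 = c :: goB n (k + 1) (stepB n c)
        rw [e1, hstep]
      · show iterB n (k + 1) (stepB n c) = rollV n c + 1
        rw [hstep]
        exact e2
    · have e0 : dfsA n c 0 hc0 = [] := C2 (by omega)
      refine ⟨0, ?_, ?_⟩
      · show c :: dfsA n c 0 hc0 = goB n 1 c
        rw [e0]
        rfl
      · show stepB n c = rollV n c + 1
        rw [stepB, if_neg hb]
        rfl

theorem pv_top_chain (n : Int) (hn : 1 ≤ n) :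
    ∃ k, dfsA n 0 1 (le_refl 0) = goB n (k + 1) 1 := by
  obtain ⟨C1, C2⟩ := pv_chain_loop n 0 (le_refl 0) (by omega)
    (fun c' hc' _ h1 h2 => pv_sub_chain n (n - c').toNat c' hc' rfl h1 h2) 9 1 rfl (by omega)
  obtain ⟨k, e1, _⟩ := C1 ⟨by omega, by omega⟩
  rw [show (0 : Int) * 10 + ((1 : Nat) : Int) = 1 from by omega] at e1
  exact ⟨k, e1⟩

-- ---------- membership ----------

theorem pv_mem_loop (n cur : Int) (hc : 0 ≤ cur) (hcn : cur ≤ n)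
    (IH : ∀ (c' : Int) (hc' : 0 ≤ c'), cur < c' → 1 ≤ c' → c' ≤ n →
      ∀ x, x ∈ subL n c' hc' ↔ (x ≤ n ∧ Pref c' x)) :
    ∀ (d i : Nat), i + d = 10 → 1 ≤ cur * 10 + (i : Int) → ∀ x,
      (x ∈ dfsA n cur i hc ↔
        ∃ j : Nat, i ≤ j ∧ j ≤ 9 ∧ cur * 10 + (j : Int) ≤ n ∧ x ≤ n ∧ Pref (cur * 10 + (j : Int)) x) := by
  intro d
  induction d with
  | zero =>
    intro i hd hi1 x
    rw [dfsA, dif_neg (by omega : ¬ i < 10)]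
    constructor
    · intro h; simp at h
    · rintro ⟨j, hj1, hj2, -⟩; exact (by omega : False).elim
  | succ d ihd =>
    intro i hd hi1 x
    have hi10 : i < 10 := by omega
    by_cases hle : cur * 10 + (i : Int) ≤ n
    · rw [dfsA, dif_pos hi10, dif_neg (by omega : ¬ cur * 10 + (i : Int) > n),
          dif_neg (by omega : ¬ cur * 10 + (i : Int) = 0),
          List.mem_append, List.mem_cons]
      have hS := IH (cur * 10 + (i : Int)) (by omega) (by omega) (by omega) hle x
      rw [subL, List.mem_cons] at hS
      have hR := ihd (i + 1) (by omega) (by push_cast; omega) x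
      rw [hS, hR]
      constructor
      · rintro (⟨hx, hp⟩ | ⟨j, h1, h2, h3, h4, h5⟩)
        · exact ⟨i, le_refl i, by omega, hle, hx, hp⟩
        · exact ⟨j, by omega, h2, h3, h4, h5⟩
      · rintro ⟨j, h1, h2, h3, h4, h5⟩
        rcases Nat.eq_or_lt_of_le h1 with rfl | hlt
        · exact Or.inl ⟨h4, h5⟩
        · exact Or.inr ⟨j, by omega, h2, h3, h4, h5⟩
    · rw [dfsA, dif_pos hi10, dif_pos (by omega : cur * 10 + (i : Int) > n)]
      constructor
      · intro h; simp at h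
      · rintro ⟨j, h1, h2, h3, -⟩; exact (by omega : False).elim

theorem pv_sub_mem (n : Int) : ∀ (m : Nat) (c : Int) (hc0 : 0 ≤ c), (n - c).toNat = m →
    1 ≤ c → c ≤ n → ∀ x, (x ∈ subL n c hc0 ↔ (x ≤ n ∧ Pref c x)) := by
  intro m
  induction m using Nat.strong_induction_on with
  | _ m ih =>
    intro c hc0 hm h1 h2 x
    have IH' : ∀ (c' : Int) (hc' : 0 ≤ c'), c < c' → 1 ≤ c' → c' ≤ n →
        ∀ x, (x ∈ subL n c' hc' ↔ (x ≤ n ∧ Pref c' x)) :=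
      fun c' hc' hlt h1' h2' => ih (n - c').toNat (by omega) c' hc' rfl h1' h2'
    have hM := pv_mem_loop n c hc0 h2 IH' 10 0 rfl (by omega) x
    rw [subL, List.mem_cons, hM]
    constructor
    · rintro (rfl | ⟨j, -, hj9, hjn, hx, hp⟩)
      · exact ⟨h2, pv_pref_refl x⟩
      · exact ⟨hx, pv_pref_up c x j hj9 hp⟩
    · rintro ⟨hx, hp⟩
      by_cases hxc : c = x
      · exact Or.inl hxc.symm
      · obtain ⟨j, hj9, hle, hp'⟩ := pv_pref_down c x h1 hxc hp
        exact Or.inr ⟨j, by omega, hj9, by omega, hx, hp'⟩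

theorem pv_sub_mem' (n c : Int) (hc0 : 0 ≤ c) (h1 : 1 ≤ c) (h2 : c ≤ n) (x : Int) :
    x ∈ subL n c hc0 ↔ (x ≤ n ∧ Pref c x) :=
  pv_sub_mem n (n - c).toNat c hc0 rfl h1 h2 x

theorem pv_loop_mem (n cur : Int) (hc : 0 ≤ cur) (hcn : cur ≤ n) (i : Nat) (hile : i ≤ 10)
    (hi1 : 1 ≤ cur * 10 + (i : Int)) (x : Int) :
    x ∈ dfsA n cur i hc ↔
      ∃ j : Nat, i ≤ j ∧ j ≤ 9 ∧ cur * 10 + (j : Int) ≤ n ∧ x ≤ n ∧ Pref (cur * 10 + (j : Int)) x :=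
  pv_mem_loop n cur hc hcn (fun c' hc' _ h1 h2 x => pv_sub_mem' n c' hc' h1 h2 x)
    (10 - i) i (by omega) hi1 x

-- ---------- nodup ----------

theorem pv_nodup_loop (n cur : Int) (hc : 0 ≤ cur) (hcn : cur ≤ n)
    (IHnd : ∀ (c' : Int) (hc' : 0 ≤ c'), cur < c' → 1 ≤ c' → c' ≤ n → (subL n c' hc').Nodup) :
    ∀ (d i : Nat), i + d = 10 → 1 ≤ cur * 10 + (i : Int) → (dfsA n cur i hc).Nodup := by
  intro d
  induction d with
  | zero =>
    intro i hd hi1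
    rw [dfsA, dif_neg (by omega : ¬ i < 10)]
    exact List.nodup_nil
  | succ d ihd =>
    intro i hd hi1
    have hi10 : i < 10 := by omega
    by_cases hle : cur * 10 + (i : Int) ≤ n
    · rw [dfsA, dif_pos hi10, dif_neg (by omega : ¬ cur * 10 + (i : Int) > n),
          dif_neg (by omega : ¬ cur * 10 + (i : Int) = 0)]
      refine List.Nodup.append (IHnd _ (by omega) (by omega) (by omega) hle)
        (ihd (i + 1) (by omega) (by push_cast; omega)) ?_
      intro a ha har
      obtain ⟨hxn, hpref⟩ :=
        (pv_sub_mem' n (cur * 10 + (i : Int)) (by omega) (by omega) hle a).mp ha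
      obtain ⟨j, hj1, hj9, -, -, hpj⟩ :=
        (pv_loop_mem n cur hc hcn (i + 1) (by omega) (by push_cast; omega) a).mp har
      exact pv_pref_disj cur a hc i j (by omega) hj9 (by omega) hi1 (by omega) hpref hpj
    · rw [dfsA, dif_pos hi10, dif_pos (by omega : cur * 10 + (i : Int) > n)]
      exact List.nodup_nil

theorem pv_sub_nodup (n : Int) : ∀ (m : Nat) (c : Int) (hc0 : 0 ≤ c), (n - c).toNat = m →
    1 ≤ c → c ≤ n → (subL n c hc0).Nodup := by
  intro m
  induction m using Nat.strong_induction_on with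
  | _ m ih =>
    intro c hc0 hm h1 h2
    have IH' : ∀ (c' : Int) (hc' : 0 ≤ c'), c < c' → 1 ≤ c' → c' ≤ n → (subL n c' hc').Nodup :=
      fun c' hc' hlt h1' h2' => ih (n - c').toNat (by omega) c' hc' rfl h1' h2'
    rw [subL, List.nodup_cons]
    refine ⟨?_, pv_nodup_loop n c hc0 h2 IH' 10 0 rfl (by omega)⟩
    intro hmem
    obtain ⟨j, -, hj9, -, -, hp⟩ := (pv_loop_mem n c hc0 h2 0 (by omega) (by omega) c).mp hmem
    have := pv_pref_le _ _ (by omega) hp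
    omega

-- ---------- assembly ----------

theorem pv_top_mem (n : Int) (hn : 1 ≤ n) (x : Int) :
    x ∈ dfsA n 0 1 (le_refl 0) ↔ (1 ≤ x ∧ x ≤ n) := by
  rw [pv_loop_mem n 0 (le_refl 0) (by omega) 1 (by omega) (by omega) x]
  constructor
  · rintro ⟨j, hj1, hj9, hjn, hx, hp⟩
    have := pv_pref_le _ _ (by omega) hp
    omega
  · rintro ⟨h1x, h2x⟩
    obtain ⟨k, hk1, hk9⟩ := pv_lead_digit x.toNat x (by omega) rfl (by omega)
    have hb := pv_strip_bounds k x (by omega)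
    exact ⟨(strip k x).toNat, by omega, by omega, by omega, h2x, ⟨k, by omega⟩⟩

theorem pv_top_length (n : Int) (hn : 1 ≤ n) :
    (dfsA n 0 1 (le_refl 0)).length = n.toNat := by
  have hnd1 : (dfsA n 0 1 (le_refl 0)).Nodup :=
    pv_nodup_loop n 0 (le_refl 0) (by omega)
      (fun c' hc' _ h1 h2 => pv_sub_nodup n (n - c').toNat c' hc' rfl h1 h2) 9 1 rfl (by omega)
  have hnd2 : (List.map (fun (j : Nat) => (j : Int) + 1) (List.range n.toNat)).Nodup := by
    refine List.Nodup.map ?_ List.nodup_range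
    intro a b h
    simp only at h
    omega
  have hperm : (dfsA n 0 1 (le_refl 0)).Perm (List.map (fun (j : Nat) => (j : Int) + 1) (List.range n.toNat)) := by
    rw [List.perm_ext_iff_of_nodup hnd1 hnd2]
    intro a
    rw [pv_top_mem n hn a]
    simp only [List.mem_map]
    constructor
    · rintro ⟨h1, h2⟩
      exact ⟨(a - 1).toNat, List.mem_range.mpr (by omega), by omega⟩
    · rintro ⟨j, hj, hja⟩
      have := List.mem_range.mp hj
      omega
  have hlen := hperm.length_eq
  simpa using hlen

theorem pv_main_eq (n : Int) : lexicalOrder2 n = lexicalOrder2_alt n := by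
  show dfsA n 0 0 (le_refl 0) = goB n n.toNat 1
  by_cases hn : 1 ≤ n
  · have h01 : dfsA n 0 0 (le_refl 0) = dfsA n 0 1 (le_refl 0) := by
      rw [dfsA, dif_pos (by omega : (0 : Nat) < 10),
          dif_neg (by omega : ¬ (0 : Int) * 10 + ((0 : Nat) : Int) > n),
          dif_pos (by omega : (0 : Int) * 10 + ((0 : Nat) : Int) = 0)]
    obtain ⟨k, e1⟩ := pv_top_chain n hn
    have hlen := pv_top_length n hn
    rw [e1, pv_goB_length] at hlen
    rw [h01, e1, ← hlen]
  · have hz : n.toNat = 0 := by omega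
    rw [hz]
    show _ = []
    by_cases hneg : n < 0
    · rw [dfsA, dif_pos (by omega : (0 : Nat) < 10),
          dif_pos (by omega : (0 : Int) * 10 + ((0 : Nat) : Int) > n)]
    · rw [dfsA, dif_pos (by omega : (0 : Nat) < 10),
          dif_neg (by omega : ¬ (0 : Int) * 10 + ((0 : Nat) : Int) > n),
          dif_pos (by omega : (0 : Int) * 10 + ((0 : Nat) : Int) = 0),
          dfsA, dif_pos (by omega : (1 : Nat) < 10),
          dif_pos (by omega : (0 : Int) * 10 + ((1 : Nat) : Int) > n)]

-- ===== VERDICT (by name: the statement is the Claim_ definition above) =====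
theorem lexicalOrder2_spec : Claim_equal_lexicalOrder2 := by
  intro n _
  show lexicalOrder2 n = lexicalOrder2_alt n
  exact pv_main_eq n
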